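-- pv_equiv track=rewrite | github.com/arindhimar/BluePineapple | Python Programs/18-12-25/044.py | match_word_at_start
-- ===== SOURCE A (Python) =====
-- def match_word_at_start(text):
--     if not text:
--         return None
--
--     word=""
--     for ch in text:
--         if ('a'<=ch<='z') or ('A'<=ch<='Z') or ('0'<=ch<='9') or ch =='_':
--             word+=ch
--         else:
--             break
--
--     return word if word else None
-- ===== SOURCE B (Python) =====
-- WORD_CHARS = frozenset(
--     "abcdefghijklmnopqrstuvwxyzABCDEFGHIJKLMNOPQRSTUVWXYZ0123456789_"
-- )
--
-- def match_word_at_start(text):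
--     i = 0
--     while i < len(text) and text[i] in WORD_CHARS:
--         i += 1
--     return text[:i] or None
-- ===== Notes on version B (the rewrite author's own statement) =====
-- stated objective: alternative
-- what changed: B scans by index to find the word-prefix length against a precomputed character set and returns one slice, instead of A's accumulate-a-growing-string loop with range comparisons and a break.
import Mathlib
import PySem

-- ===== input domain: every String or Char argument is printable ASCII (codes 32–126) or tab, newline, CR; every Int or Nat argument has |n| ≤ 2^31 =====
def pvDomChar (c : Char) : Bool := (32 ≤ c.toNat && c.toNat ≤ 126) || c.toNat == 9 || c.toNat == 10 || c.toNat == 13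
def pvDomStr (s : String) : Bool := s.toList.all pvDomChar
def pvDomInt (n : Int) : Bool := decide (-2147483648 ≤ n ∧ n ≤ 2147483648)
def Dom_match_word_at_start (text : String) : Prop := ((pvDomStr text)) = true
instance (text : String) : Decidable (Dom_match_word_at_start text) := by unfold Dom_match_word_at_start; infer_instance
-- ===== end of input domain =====

-- B replaces A's accumulate-and-break character loop by an index scan for the
-- word-prefix length against a precomputed character set, returning one slice
-- (same cost, different shape).

-- ===== PORT A =====
-- A's for-loop with break: accumulate word, stop at the first non-word character
def matchWordLoopA : List Char → String → String
  | [], word => word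
  | ch :: rest, word =>
      if ('a' ≤ ch ∧ ch ≤ 'z') ∨ ('A' ≤ ch ∧ ch ≤ 'Z') ∨ ('0' ≤ ch ∧ ch ≤ '9') ∨ ch = '_' then
        matchWordLoopA rest (word.push ch)
      else
        word

def match_word_at_start (text : String) : Option String :=
  if text = "" then none
  else
    let word := matchWordLoopA text.toList ""
    if word = "" then none else some word

-- ===== PORT B =====
-- WORD_CHARS as a finite set of the 63 distinct ASCII word characters
def wordChars : List Char := "abcdefghijklmnopqrstuvwxyzABCDEFGHIJKLMNOPQRSTUVWXYZ0123456789_".toList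

-- B's 'while i < len(text) and text[i] in WORD_CHARS: i += 1' as structural
-- recursion over the remaining characters, returning the final index i
def wordPrefixLen : List Char → Nat
  | [] => 0
  | ch :: rest => if ch ∈ wordChars then wordPrefixLen rest + 1 else 0

def match_word_at_start_alt (text : String) : Option String :=
  let i := wordPrefixLen text.toList
  let p := String.ofList (text.toList.take i)   -- text[:i] with 0 ≤ i ≤ len(text): exact
  if p = "" then none else some p

-- ===== PRECONDITION & SPEC =====
def Spec_match_word_at_start (text : String) (out : Option String) : Prop := out = match_word_at_start_alt text
instance (text : String) (out : Option String) : Decidable (Spec_match_word_at_start text out) := by unfold Spec_match_word_at_start; infer_instance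

-- ===== CLAIM (what is proved, stated in full; the proofs are below) =====
def Claim_equal_match_word_at_start : Prop := ∀ (text : String), Dom_match_word_at_start text → Spec_match_word_at_start text (match_word_at_start text)

-- ===== LEMMAS AND PROOFS =====

-- membership in wordChars, expressed on character codes
lemma mem_wordChars_iff (c : Char) : c ∈ wordChars ↔ (97 ≤ c.toNat ∧ c.toNat ≤ 122) ∨ (65 ≤ c.toNat ∧ c.toNat ≤ 90) ∨ (48 ≤ c.toNat ∧ c.toNat ≤ 57) ∨ c.toNat = 95 := by
  have h1 : c ∈ wordChars ↔ c.toNat ∈ wordChars.map Char.toNat := by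
    constructor
    · exact fun h => List.mem_map_of_mem h
    · intro h
      obtain ⟨b, hb, hbc⟩ := List.mem_map.mp h
      rwa [Char.ext (UInt32.eq_of_toBitVec_eq (BitVec.eq_of_toNat_eq hbc))] at hb
  have h2 : wordChars.map Char.toNat = [97, 98, 99, 100, 101, 102, 103, 104, 105, 106, 107, 108, 109, 110, 111, 112, 113, 114, 115, 116, 117, 118, 119, 120, 121, 122, 65, 66, 67, 68, 69, 70, 71, 72, 73, 74, 75, 76, 77, 78, 79, 80, 81, 82, 83, 84, 85, 86, 87, 88, 89, 90, 48, 49, 50, 51, 52, 53, 54, 55, 56, 57, 95] := by decide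
  rw [h1, h2]
  simp only [List.mem_cons, List.not_mem_nil, or_false]
  omega

-- A's range test and B's set membership accept exactly the same characters
lemma wordCond_iff (c : Char) :
    (('a' ≤ c ∧ c ≤ 'z') ∨ ('A' ≤ c ∧ c ≤ 'Z') ∨ ('0' ≤ c ∧ c ≤ '9') ∨ c = '_') ↔ c ∈ wordChars := by
  have hle : ∀ (a b : Char), a ≤ b ↔ a.toNat ≤ b.toNat := fun a b => Iff.rfl
  have heq : c = '_' ↔ c.toNat = 95 :=
    ⟨fun h => by subst h; decide, fun h => Char.ext (UInt32.eq_of_toBitVec_eq (BitVec.eq_of_toNat_eq h))⟩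
  rw [mem_wordChars_iff]
  simp only [hle, heq, show ('a').toNat = 97 from rfl, show ('z').toNat = 122 from rfl,
    show ('A').toNat = 65 from rfl, show ('Z').toNat = 90 from rfl,
    show ('0').toNat = 48 from rfl, show ('9').toNat = 57 from rfl]

-- A's loop returns its accumulator followed by the word prefix B measures
lemma loopA_eq (l : List Char) (ws : List Char) :
    matchWordLoopA l (String.ofList ws) = String.ofList (ws ++ l.take (wordPrefixLen l)) := by
  induction l generalizing ws with
  | nil => simp [matchWordLoopA, wordPrefixLen]
  | cons c rest ih =>
    by_cases h : c ∈ wordChars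
    · rw [matchWordLoopA, if_pos ((wordCond_iff c).mpr h)]
      have hp : (String.ofList ws).push c = String.ofList (ws ++ [c]) := by
        apply String.toList_inj.mp
        simp [String.toList_push, String.toList_ofList]
      rw [hp, ih]
      simp [wordPrefixLen, h]
    · rw [matchWordLoopA, if_neg (fun hc => h ((wordCond_iff c).mp hc))]
      simp [wordPrefixLen, h]

-- ===== VERDICT (by name: the statement is the Claim_ definition above) =====
theorem match_word_at_start_spec : Claim_equal_match_word_at_start := by
  intro text _
  show match_word_at_start text = match_word_at_start_alt text
  unfold match_word_at_start match_word_at_start_alt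
  by_cases h : text = ""
  · subst h; decide
  · rw [if_neg h]
    have hl : matchWordLoopA text.toList "" =
        String.ofList (text.toList.take (wordPrefixLen text.toList)) := by
      simpa using loopA_eq text.toList []
    rw [hl]
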